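-- pv_equiv track=rewrite | github.com/btasneem99/Cornell-5112-Algorithms | Assignment-4/problems/problem_1/p1_b.py | count_min_sketch
-- ===== SOURCE A (Python) =====
-- def count_min_sketch(a, b, w, p, stream):
--     c = len(a)
--
--     ans = [[0 for _ in range(w)] for _ in range(c)]
--
--     for x in stream:
--         for i in range(c):
--             hash_ind = ((a[i] * x + b[i]) % p) % w
--
--             ans[i][hash_ind] += 1
--
--     return ans
-- ===== SOURCE B (Python) =====
-- def count_min_sketch(a, b, w, p, stream):
--     # The bucket of x depends on x only through x % p: compress the stream once
--     # into a residue -> multiplicity table, then fill each row by adding the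
--     # multiplicities of the (at most min(len(stream), |p|)) distinct residues.
--     if not a:
--         return []
--     freq = {}
--     for x in stream:
--         r = x % p
--         freq[r] = freq.get(r, 0) + 1
--     ans = []
--     for i in range(len(a)):
--         row = [0] * w
--         for r, m in freq.items():
--             row[((a[i] * r + b[i]) % p) % w] += m
--         ans.append(row)
--     return ans
-- ===== Notes on version B (the rewrite author's own statement) =====
-- stated objective: faster
-- what changed: B uses the identity (a*x+b)%p == (a*(x%p)+b)%p to compress the stream once into a residue->multiplicity table, then fills each row by hashing only the distinct residues and adding their multiplicities, instead of A's per-element increment of every row.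
import Mathlib
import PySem

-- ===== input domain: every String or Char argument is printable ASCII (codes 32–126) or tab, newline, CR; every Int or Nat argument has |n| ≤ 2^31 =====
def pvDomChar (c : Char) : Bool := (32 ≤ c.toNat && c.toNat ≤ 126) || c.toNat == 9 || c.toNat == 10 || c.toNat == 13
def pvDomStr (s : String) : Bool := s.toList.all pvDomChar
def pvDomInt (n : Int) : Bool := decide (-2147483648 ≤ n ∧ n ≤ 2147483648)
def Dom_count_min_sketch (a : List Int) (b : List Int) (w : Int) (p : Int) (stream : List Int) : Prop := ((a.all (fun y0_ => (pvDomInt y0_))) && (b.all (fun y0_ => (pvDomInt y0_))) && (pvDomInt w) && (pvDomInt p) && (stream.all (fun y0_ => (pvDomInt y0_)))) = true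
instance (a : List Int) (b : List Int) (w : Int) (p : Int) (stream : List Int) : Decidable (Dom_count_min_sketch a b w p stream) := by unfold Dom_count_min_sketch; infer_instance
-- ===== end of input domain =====

-- B exploits that the bucket of x depends on x only through x % p: it compresses the
-- stream once into a residue→multiplicity table, then fills each row by adding the
-- multiplicities of the distinct residues (objective: alternative algorithm).

-- ===== PORT A =====
def count_min_sketch (a : List Int) (b : List Int) (w : Int) (p : Int) (stream : List Int) : List (List Int) :=
  -- c = len(a); ans = [[0 for _ in range(w)] for _ in range(c)]
  let c : Int := PySem.List.len a
  let ans := (PySem.List.pyRange 0 c 1).map (fun _ => (PySem.List.pyRange 0 w 1).map (fun _ => (0 : Int)))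
  -- for x in stream: for i in range(c): hash_ind = ((a[i]*x + b[i]) % p) % w; ans[i][hash_ind] += 1
  stream.foldl (fun ans x =>
    (PySem.List.pyRange 0 c 1).foldl (fun ans i =>
      let hashInd := PySem.Int.mod (PySem.Int.mod (PySem.List.pyGetD a i 0 * x + PySem.List.pyGetD b i 0) p) w
      PySem.List.pySetD ans i
        (PySem.List.pySetD (PySem.List.pyGetD ans i [])
          hashInd (PySem.List.pyGetD (PySem.List.pyGetD ans i []) hashInd 0 + 1))) ans) ans

-- ===== PORT B =====
def count_min_sketch_alt (a : List Int) (b : List Int) (w : Int) (p : Int) (stream : List Int) : List (List Int) :=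
  -- if not a: return []
  if a = [] then []
  else
    -- freq = {}; for x in stream: r = x % p; freq[r] = freq.get(r, 0) + 1
    let freq := stream.foldl (fun d x =>
        let r := PySem.Int.mod x p
        d.insert r (d.getD r 0 + 1)) (PySem.Dict.empty : PySem.Dict Int Int)
    -- ans = []; for i in range(len(a)): row = [0]*w; for r, m in freq.items(): row[((a[i]*r+b[i])%p)%w] += m; ans.append(row)
    (PySem.List.pyRange 0 (PySem.List.len a) 1).foldl (fun ans i =>
      let row := freq.items.foldl (fun row rv =>
        let k := PySem.Int.mod (PySem.Int.mod (PySem.List.pyGetD a i 0 * rv.1 + PySem.List.pyGetD b i 0) p) w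
        PySem.List.pySetD row k (PySem.List.pyGetD row k 0 + rv.2)) (List.replicate w.toNat 0)
      ans ++ [row]) []

-- ===== PRECONDITION & SPEC =====
-- Pre_ is exactly where the Python A returns normally: when the nested loops run at all
-- (stream and a both nonempty), A needs b[i] for every i < len(a), a nonzero modulus p,
-- and a positive width w (w ≤ 0 makes every row empty, so the increment raises IndexError).
def Pre_count_min_sketch (a : List Int) (b : List Int) (w : Int) (p : Int) (stream : List Int) : Prop :=
  stream = [] ∨ a = [] ∨ (a.length ≤ b.length ∧ p ≠ 0 ∧ 0 < w)
instance (a : List Int) (b : List Int) (w : Int) (p : Int) (stream : List Int) : Decidable (Pre_count_min_sketch a b w p stream) := by unfold Pre_count_min_sketch; infer_instance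

def pvWitness_count_min_sketch : List Int × List Int × Int × Int × List Int := ([1, 2], [0, 1], 5, 7, [1, 2, 3, 8])

def Spec_count_min_sketch (a : List Int) (b : List Int) (w : Int) (p : Int) (stream : List Int) (out : List (List Int)) : Prop := out = count_min_sketch_alt a b w p stream
instance (a : List Int) (b : List Int) (w : Int) (p : Int) (stream : List Int) (out : List (List Int)) : Decidable (Spec_count_min_sketch a b w p stream out) := by unfold Spec_count_min_sketch; infer_instance

-- ===== CLAIM (what is proved, stated in full; the proofs are below) =====
def Claim_equal_count_min_sketch : Prop := ∀ (a : List Int) (b : List Int) (w : Int) (p : Int) (stream : List Int), Dom_count_min_sketch a b w p stream → Pre_count_min_sketch a b w p stream → Spec_count_min_sketch a b w p stream (count_min_sketch a b w p stream)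

-- ===== LEMMAS AND PROOFS =====

theorem pvFoldSetRange {α : Type} (d : α) (f : Nat → α → α) :
    ∀ (n : Nat) (ans : List α), n ≤ ans.length →
    (List.range n).foldl (fun acc k => acc.set k (f k (acc.getD k d))) ans
      = ans.mapIdx (fun i x => if i < n then f i x else x) := by
  intro n
  induction n with
  | zero =>
      intro ans _
      simp only [List.range_zero, List.foldl_nil, Nat.not_lt_zero, if_false]
      apply List.ext_getElem <;> simp
  | succ n ih =>
      intro ans hn
      rw [List.range_succ, List.foldl_append, List.foldl_cons, List.foldl_nil, ih ans (by omega)]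
      have hlen : (ans.mapIdx (fun i x => if i < n then f i x else x)).length = ans.length := by simp
      have hnl : n < ans.length := by omega
      have hget : (ans.mapIdx (fun i x => if i < n then f i x else x)).getD n d = ans[n] := by
        rw [List.getD_eq_getElem _ _ (by omega), List.getElem_mapIdx]
        simp
      rw [hget]
      apply List.ext_getElem (by simp)
      intro j h1 h2
      rw [List.getElem_set]
      by_cases hj : n = j
      · subst hj; simp [List.getElem_mapIdx]
      · have hj2 : j < ans.length := by simpa using h2
        rw [List.getElem_mapIdx, List.getElem_mapIdx]
        simp only [if_neg hj]
        split_ifs <;> first | rfl | omega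

theorem pvAFold (f : Nat → Int → List Int → List Int) (n : Nat) :
    ∀ (s : List Int) (ans : List (List Int)), n ≤ ans.length →
    s.foldl (fun acc x => (List.range n).foldl (fun acc k => acc.set k (f k x (acc.getD k []))) acc) ans
      = ans.mapIdx (fun i row => if i < n then s.foldl (fun r x => f i x r) row else row) := by
  intro s
  induction s with
  | nil =>
      intro ans _
      simp only [List.foldl_nil]
      apply List.ext_getElem (by simp)
      intro j h1 h2
      rw [List.getElem_mapIdx]
      split <;> rfl
  | cons x s ih =>
      intro ans hn
      rw [List.foldl_cons, pvFoldSetRange [] (fun k => f k x) n ans hn,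
        ih _ (by simpa using hn), List.mapIdx_mapIdx]
      apply List.ext_getElem (by simp)
      intro j h1 h2
      rw [List.getElem_mapIdx, List.getElem_mapIdx]
      by_cases hlt : j < n <;> simp [hlt]

theorem pvLen_incFold (ks : List Int) : ∀ (r : List Int),
    (ks.foldl (fun r k => r.set k.toNat (r.getD k.toNat 0 + 1)) r).length = r.length := by
  induction ks with
  | nil => intro r; rfl
  | cons k ks ih => intro r; rw [List.foldl_cons, ih]; simp

theorem pvIncFold_getD (ks : List Int) (hks : ∀ k ∈ ks, 0 ≤ k) :
    ∀ (r : List Int) (j : Nat), j < r.length →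
    (ks.foldl (fun r k => r.set k.toNat (r.getD k.toNat 0 + 1)) r).getD j 0
      = r.getD j 0 + (ks.count ((j : Nat) : Int) : Int) := by
  induction ks with
  | nil => intro r j hj; simp
  | cons k ks ih =>
      intro r j hj
      have hk : 0 ≤ k := hks k (by simp)
      have hks' : ∀ k' ∈ ks, 0 ≤ k' := fun k' hk' => hks k' (by simp [hk'])
      rw [List.foldl_cons, ih hks' _ j (by simpa using hj)]
      rw [List.getD_eq_getElem _ _ (by simpa using hj), List.getD_eq_getElem _ _ hj,
        List.getElem_set, List.count_cons]
      by_cases hkj : k.toNat = j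
      · have : k = ((j : Nat) : Int) := by omega
        subst this
        simp only [Int.toNat_natCast, List.getD_eq_getElem _ _ hj, BEq.rfl, if_true]
        push_cast
        ring
      · have hne : (k == ((j : Nat) : Int)) = false := by
          simp only [beq_eq_false_iff_ne, ne_eq]
          omega
        simp only [if_neg hkj, hne]
        simp

theorem pvPyGetD_nonneg (r : List Int) (k : Int) (hk : 0 ≤ k) :
    PySem.List.pyGetD r k 0 = r.getD k.toNat 0 := by
  lift k to ℕ using hk
  simp

theorem pvIncFold_py_eq (ks : List Int) (hks : ∀ k ∈ ks, 0 ≤ k) : ∀ (r : List Int),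
    ks.foldl (fun r k => PySem.List.pySetD r k (PySem.List.pyGetD r k 0 + 1)) r
      = ks.foldl (fun r k => r.set k.toNat (r.getD k.toNat 0 + 1)) r := by
  induction ks with
  | nil => intro r; rfl
  | cons k ks ih =>
      intro r
      have hk : 0 ≤ k := hks k (by simp)
      rw [List.foldl_cons, List.foldl_cons, PySem.List.pySetD_of_nonneg r _ hk,
        pvPyGetD_nonneg r k hk, ih (fun k' hk' => hks k' (by simp [hk']))]

-- generic "add multiplicity at an index" fold (B's row-filling loop), Nat-index form
theorem pvLen_accFold (kvs : List (Int × Int)) : ∀ (r : List Int),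
    (kvs.foldl (fun r kv => r.set kv.1.toNat (r.getD kv.1.toNat 0 + kv.2)) r).length = r.length := by
  induction kvs with
  | nil => intro r; rfl
  | cons kv kvs ih => intro r; rw [List.foldl_cons, ih]; simp

theorem pvAccFold_getD (kvs : List (Int × Int)) (hkvs : ∀ kv ∈ kvs, 0 ≤ kv.1) :
    ∀ (r : List Int) (j : Nat), j < r.length →
    (kvs.foldl (fun r kv => r.set kv.1.toNat (r.getD kv.1.toNat 0 + kv.2)) r).getD j 0
      = r.getD j 0 + ((kvs.filter (fun kv => kv.1 == ((j : Nat) : Int))).map Prod.snd).sum := by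
  induction kvs with
  | nil => intro r j hj; simp
  | cons kv kvs ih =>
      intro r j hj
      have hk : 0 ≤ kv.1 := hkvs kv (by simp)
      have hkvs' : ∀ kv' ∈ kvs, 0 ≤ kv'.1 := fun kv' h => hkvs kv' (by simp [h])
      rw [List.foldl_cons, ih hkvs' _ j (by simpa using hj)]
      rw [List.getD_eq_getElem _ _ (by simpa using hj), List.getD_eq_getElem _ _ hj,
        List.getElem_set, List.filter_cons]
      by_cases hkj : kv.1.toNat = j
      · have hkv : kv.1 = ((j : Nat) : Int) := by omega
        have hbeq : (kv.1 == ((j : Nat) : Int)) = true := by simp [hkv]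
        simp only [if_pos hkj, hbeq, if_true, List.map_cons, List.sum_cons]
        rw [hkj, List.getD_eq_getElem _ _ hj]
        ring
      · have hne : (kv.1 == ((j : Nat) : Int)) = false := by
          simp only [beq_eq_false_iff_ne, ne_eq]
          omega
        simp [if_neg hkj, hne]

theorem pvAccFold_py_eq (kvs : List (Int × Int)) (hkvs : ∀ kv ∈ kvs, 0 ≤ kv.1) : ∀ (r : List Int),
    kvs.foldl (fun r kv => PySem.List.pySetD r kv.1 (PySem.List.pyGetD r kv.1 0 + kv.2)) r
      = kvs.foldl (fun r kv => r.set kv.1.toNat (r.getD kv.1.toNat 0 + kv.2)) r := by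
  induction kvs with
  | nil => intro r; rfl
  | cons kv kvs ih =>
      intro r
      have hk : 0 ≤ kv.1 := hkvs kv (by simp)
      rw [List.foldl_cons, List.foldl_cons, PySem.List.pySetD_of_nonneg r _ hk,
        pvPyGetD_nonneg r kv.1 hk, ih (fun kv' h => hkvs kv' (by simp [h]))]

-- summing "1 at x" over a nodup list with one filter
theorem pvSum_zero (P : Int → Bool) (x : Int) : ∀ (S : List Int), x ∉ S →
    ((S.filter P).map (fun r => if r == x then (1 : Int) else 0)).sum = 0 := by
  intro S
  induction S with
  | nil => intro _; simp
  | cons y S ih =>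
      intro hx
      have hy : ¬ y = x := fun h => hx (by simp [h])
      have hxS : x ∉ S := fun h => hx (by simp [h])
      rw [List.filter_cons]
      by_cases hP : P y
      · simp only [hP, if_true, List.map_cons, List.sum_cons, ih hxS]
        simp [hy]
      · simp [hP]
        simpa using ih hxS

theorem pvSum_single (P : Int → Bool) (x : Int) : ∀ (S : List Int), S.Nodup → x ∈ S →
    ((S.filter P).map (fun r => if r == x then (1 : Int) else 0)).sum
      = if P x then 1 else 0 := by
  intro S
  induction S with
  | nil => intro _ h; simp at h
  | cons y S ih =>
      intro hnd hx
      have hndS : S.Nodup := (List.nodup_cons.mp hnd).2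
      have hyS : y ∉ S := (List.nodup_cons.mp hnd).1
      rw [List.filter_cons]
      by_cases hxy : x = y
      · subst hxy
        by_cases hP : P x
        · simp only [hP, if_true, List.map_cons, List.sum_cons, pvSum_zero P x S hyS]
          simp
        · simp [hP]
          simpa using pvSum_zero P x S hyS
      · have hxS : x ∈ S := by
          rcases List.mem_cons.mp hx with h | h
          · exact absurd h hxy
          · exact h
        by_cases hP : P y
        · simp only [hP, if_true, List.map_cons, List.sum_cons, ih hndS hxS]
          have : (y == x) = false := by simp [Ne.symm hxy]
          simp [this]
        · simp [hP]
          simpa using ih hndS hxS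

-- sum of multiplicities over the distinct residues hashing to j = count of j among all keys
theorem pvSum (g : Int → Int) (j : Int) (S : List Int) (hnd : S.Nodup) :
    ∀ (rs : List Int), (∀ x ∈ rs, x ∈ S) →
    ((S.filter (fun r => g r == j)).map (fun r => (rs.count r : Int))).sum
      = ((rs.map g).count j : Int) := by
  intro rs
  induction rs with
  | nil => intro _; simp
  | cons x rs ih =>
      intro hsub
      have hxS : x ∈ S := hsub x (by simp)
      have hsub' : ∀ y ∈ rs, y ∈ S := fun y h => hsub y (by simp [h])
      have hsplit : ∀ r : Int, (((x :: rs).count r : Nat) : Int)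
          = (rs.count r : Int) + (if r == x then (1 : Int) else 0) := by
        intro r
        rw [List.count_cons]
        by_cases hr : r = x
        · simp [hr]
        · have hbe : (r == x) = false := by simp [hr]
          simp [hbe]
          exact fun h => hr h.symm
      calc ((S.filter (fun r => g r == j)).map (fun r => (((x :: rs).count r : Nat) : Int))).sum
          = ((S.filter (fun r => g r == j)).map
              (fun r => (rs.count r : Int) + (if r == x then (1 : Int) else 0))).sum := by
            congr 1
            exact List.map_congr_left (fun r _ => hsplit r)
        _ = ((S.filter (fun r => g r == j)).map (fun r => (rs.count r : Int))).sum
              + ((S.filter (fun r => g r == j)).map (fun r => if r == x then (1 : Int) else 0)).sum := by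
            rw [List.sum_map_add]
        _ = ((rs.map g).count j : Int) + (if g x == j then (1 : Int) else 0) := by
            rw [ih hsub', pvSum_single (fun r => g r == j) x S hnd hxS]
        _ = (((x :: rs).map g).count j : Int) := by
            rw [List.map_cons, List.count_cons]
            by_cases hgx : g x = j
            · simp [hgx]
            · have h1 : (g x == j) = false := by simp [hgx]
              simp [h1]

-- Python %: (a*x+b) % p depends on x only through x % p
theorem pvModShift (A0 B0 x p : Int) :
    PySem.Int.mod (A0 * PySem.Int.mod x p + B0) p = PySem.Int.mod (A0 * x + B0) p := by
  unfold PySem.Int.mod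
  have h2 := Int.fmod_add_mul_fdiv x p
  have h : A0 * x.fmod p + B0 = (A0 * x + B0) + p * (-(A0 * x.fdiv p)) := by
    have hx : x.fmod p = x - p * x.fdiv p := by omega
    rw [hx]; ring
  rw [h, Int.add_mul_fmod_self_left]

def pvKey (a b : List Int) (w p : Int) (i : Nat) (x : Int) : Int :=
  PySem.Int.mod (PySem.Int.mod (a.getD i 0 * x + b.getD i 0) p) w

theorem pvA_eq (a b : List Int) (w p : Int) (stream : List Int) :
    count_min_sketch a b w p stream
      = (List.range a.length).map (fun i =>
          (stream.map (pvKey a b w p i)).foldl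
            (fun r k => PySem.List.pySetD r k (PySem.List.pyGetD r k 0 + 1))
            ((List.range w.toNat).map (fun _ => (0 : Int)))) := by
  have hrange : PySem.List.pyRange 0 (PySem.List.len a) 1 = (List.range a.length).map (fun k => ((k : Nat) : Int)) := by
    rw [PySem.List.pyRange_one, PySem.List.len_eq]
    simp
  have hrow0 : (PySem.List.pyRange 0 w 1).map (fun _ => (0 : Int)) = (List.range w.toNat).map (fun _ => (0 : Int)) := by
    apply List.ext_getElem <;> simp [PySem.List.pyRange_one]
  dsimp only [count_min_sketch]
  rw [hrange, hrow0, List.map_map]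
  simp only [List.foldl_map, PySem.List.pyGetD_natCast, PySem.List.pySetD_natCast]
  rw [pvAFold (fun i x row => PySem.List.pySetD row
        (PySem.Int.mod (PySem.Int.mod (a.getD i 0 * x + b.getD i 0) p) w)
        (PySem.List.pyGetD row (PySem.Int.mod (PySem.Int.mod (a.getD i 0 * x + b.getD i 0) p) w) 0 + 1))
      a.length stream _ (by simp)]
  apply List.ext_getElem (by simp)
  intro j h1 h2
  simp only [List.getElem_mapIdx, List.getElem_map, List.getElem_range]
  have hj : j < a.length := by simpa using h2
  simp [hj, pvKey]

theorem pvB_eq (a b : List Int) (w p : Int) (stream : List Int) (ha : ¬ a = []) :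
    count_min_sketch_alt a b w p stream
      = (List.range a.length).map (fun i =>
          ((PySem.Set.ofList (stream.map (fun x => PySem.Int.mod x p))).map
              (fun r => (pvKey a b w p i r,
                ((stream.map (fun x => PySem.Int.mod x p)).count r : Int)))).foldl
            (fun row kv => PySem.List.pySetD row kv.1 (PySem.List.pyGetD row kv.1 0 + kv.2))
            (List.replicate w.toNat 0)) := by
  have hrange : PySem.List.pyRange 0 (PySem.List.len a) 1 = (List.range a.length).map (fun k => ((k : Nat) : Int)) := by
    rw [PySem.List.pyRange_one, PySem.List.len_eq]
    simp
  dsimp only [count_min_sketch_alt]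
  rw [if_neg ha]
  rw [show (stream.foldl (fun d x =>
        let r := PySem.Int.mod x p
        d.insert r (d.getD r 0 + 1)) (PySem.Dict.empty : PySem.Dict Int Int))
      = PySem.Dict.counter (stream.map (fun x => PySem.Int.mod x p)) by
    rw [← PySem.Dict.foldl_insert_getD_add_one_eq_counter, List.foldl_map]]
  rw [PySem.Dict.items_counter]
  rw [PySem.List.foldl_append_singleton_eq_map, hrange, List.map_map, List.nil_append]
  apply List.map_congr_left
  intro i _
  simp only [Function.comp_apply, PySem.List.pyGetD_natCast]
  rw [← List.foldl_map
      (f := fun (rv : Int × Int) => ((PySem.Int.mod (PySem.Int.mod (a.getD i 0 * rv.1 + b.getD i 0) p) w), rv.2))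
      (g := fun (row : List Int) (kv : Int × Int) =>
        PySem.List.pySetD row kv.1 (PySem.List.pyGetD row kv.1 0 + kv.2)),
    List.map_map]
  rfl

theorem pvRow_eq (w : Int) (g : Int → Int) (hg : ∀ r, 0 ≤ g r ∧ g r < w) (rs : List Int) :
    (rs.map g).foldl (fun r k => PySem.List.pySetD r k (PySem.List.pyGetD r k 0 + 1))
        ((List.range w.toNat).map (fun _ => (0 : Int)))
      = ((PySem.Set.ofList rs).map (fun r => (g r, (rs.count r : Int)))).foldl
          (fun row kv => PySem.List.pySetD row kv.1 (PySem.List.pyGetD row kv.1 0 + kv.2))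
          (List.replicate w.toNat 0) := by
  have hrow0 : (List.range w.toNat).map (fun _ => (0 : Int)) = List.replicate w.toNat 0 := by
    apply List.ext_getElem <;> simp
  have hks : ∀ k ∈ rs.map g, 0 ≤ k := by
    intro k hk
    obtain ⟨x, _, rfl⟩ := List.mem_map.mp hk
    exact (hg x).1
  have hkvs : ∀ kv ∈ (PySem.Set.ofList rs).map (fun r => (g r, (rs.count r : Int))), 0 ≤ kv.1 := by
    intro kv hkv
    obtain ⟨r, _, rfl⟩ := List.mem_map.mp hkv
    exact (hg r).1
  rw [hrow0, pvIncFold_py_eq _ hks, pvAccFold_py_eq _ hkvs]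
  apply List.ext_getElem (by rw [pvLen_incFold, pvLen_accFold])
  intro j h1 h2
  have hj : j < w.toNat := by rw [pvLen_incFold] at h1; simpa using h1
  rw [← List.getD_eq_getElem _ 0, ← List.getD_eq_getElem _ 0,
    pvIncFold_getD _ hks _ j (by simpa using hj),
    pvAccFold_getD _ hkvs _ j (by simpa using hj)]
  have hz1 : (List.replicate w.toNat (0 : Int)).getD j 0 = 0 := by
    rw [List.getD_eq_getElem _ _ (by simpa using hj)]; simp
  rw [hz1, List.filter_map, List.map_map]
  rw [zero_add, zero_add]
  have : ((PySem.Set.ofList rs).filter ((fun kv : Int × Int => kv.1 == ((j : Nat) : Int)) ∘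
        (fun r => (g r, (rs.count r : Int))))).map
        (Prod.snd ∘ (fun r => (g r, (rs.count r : Int))))
      = ((PySem.Set.ofList rs).filter (fun r => g r == ((j : Nat) : Int))).map
        (fun r => (rs.count r : Int)) := by
    rfl
  rw [this, pvSum g ((j : Nat) : Int) (PySem.Set.ofList rs) (PySem.Set.nodup_ofList rs) rs
    (fun x hx => (PySem.Set.mem_ofList rs x).mpr hx)]

theorem pvMain (a b : List Int) (w p : Int) (stream : List Int)
    (hpre : Pre_count_min_sketch a b w p stream) :
    count_min_sketch a b w p stream = count_min_sketch_alt a b w p stream := by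
  by_cases ha : a = []
  · subst ha
    rw [pvA_eq]
    dsimp only [count_min_sketch_alt]
    simp
  · rw [pvA_eq, pvB_eq a b w p stream ha]
    apply List.map_congr_left
    intro i _
    by_cases hs : stream = []
    · subst hs
      rw [show (PySem.Set.ofList (List.map (fun x => PySem.Int.mod x p) [])) = ([] : List Int) from rfl]
      simp only [List.map_nil, List.foldl_nil]
      apply List.ext_getElem <;> simp
    · have hmain : a.length ≤ b.length ∧ p ≠ 0 ∧ 0 < w := by
        rcases hpre with h | h | h
        · exact absurd h hs
        · exact absurd h ha
        · exact h
      obtain ⟨_, hp, hw⟩ := hmain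
      have hkey : stream.map (pvKey a b w p i)
          = (stream.map (fun x => PySem.Int.mod x p)).map (pvKey a b w p i) := by
        rw [List.map_map]
        apply List.map_congr_left
        intro x _
        dsimp only [Function.comp_apply, pvKey]
        rw [pvModShift]
      rw [hkey]
      exact pvRow_eq w (pvKey a b w p i)
        (fun r => ⟨PySem.Int.mod_nonneg _ hw, PySem.Int.mod_lt _ hw⟩) _

-- ===== VERDICT (by name: the statement is the Claim_ definition above) =====
theorem count_min_sketch_spec : Claim_equal_count_min_sketch := by
  intro a b w p stream _ hpre
  unfold Spec_count_min_sketch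
  exact pvMain a b w p stream hpre
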